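-- pv_equiv track=rewrite | github.com/lucas-porto/desafio_meli | utils/analytics_utils.py | _identificar_categoria_feature
-- ===== SOURCE A (Python) =====
-- def _identificar_categoria_feature(coluna: str, cols: dict) -> str:
--     """
--     Identifica a categoria de uma feature (helper interno).
--
--     Args:
--         coluna: Nome da coluna
--         cols: Dicionário de colunas por tipo
--
--     Returns:
--         Categoria da feature ou 'Original' se não for feature criada
--     """
--     categorias = {
--         "temporais": "Temporal",
--         "vendas": "Vendas",
--         "precos": "Preço",
--         "potencial": "Potencial",
--         "overselling": "Overselling",
--         "qualidade": "Qualidade",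
--     }
--
--     for cat_key, cat_label in categorias.items():
--         if coluna in cols.get(cat_key, []):
--             return cat_label
--
--     # Se não encontrou, verificar se é original
--     if coluna in cols.get("numericas_originais", []):
--         return "Original"
--
--     return "Outra"
-- ===== SOURCE B (Python) =====
-- def _identificar_categoria_feature(coluna: str, cols: dict) -> str:
--     """Reverse-lookup version: build one name->label index, then a single dict lookup."""
--     categorias = {
--         "temporais": "Temporal",
--         "vendas": "Vendas",
--         "precos": "Preço",
--         "potencial": "Potencial",
--         "overselling": "Overselling",
--         "qualidade": "Qualidade",
--     }
--     index = {}
--     for cat_key, cat_label in categorias.items():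
--         for name in cols.get(cat_key, []):
--             index.setdefault(name, cat_label)
--     for name in cols.get("numericas_originais", []):
--         index.setdefault(name, "Original")
--     return index.get(coluna, "Outra")
-- ===== Notes on version B (the rewrite author's own statement) =====
-- stated objective: idiomatic
-- what changed: Replaces the sequential per-category membership scans (plus a final 'numericas_originais' scan) with a single reverse-lookup index built once via dict.setdefault in priority order, followed by one dict lookup with default 'Outra'.
import Mathlib
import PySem

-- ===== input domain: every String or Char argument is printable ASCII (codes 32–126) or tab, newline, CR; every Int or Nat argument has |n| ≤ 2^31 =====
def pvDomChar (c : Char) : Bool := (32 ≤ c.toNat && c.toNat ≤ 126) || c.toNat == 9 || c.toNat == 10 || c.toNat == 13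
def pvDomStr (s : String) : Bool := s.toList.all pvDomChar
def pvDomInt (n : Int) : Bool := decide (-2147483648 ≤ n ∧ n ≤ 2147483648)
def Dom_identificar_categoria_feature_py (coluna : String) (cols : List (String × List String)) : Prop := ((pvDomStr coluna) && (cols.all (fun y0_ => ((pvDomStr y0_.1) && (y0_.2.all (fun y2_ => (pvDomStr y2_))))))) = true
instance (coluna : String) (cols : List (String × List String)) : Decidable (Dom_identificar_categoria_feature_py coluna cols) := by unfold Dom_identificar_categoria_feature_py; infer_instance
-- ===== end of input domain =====

-- B replaces A's sequential per-category membership scans by one reverse-lookup index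
-- (name -> label, first write wins) built once, followed by a single dict lookup (objective: idiomatic).

-- cols.get(k, [])
def pvGetCols (cols : List (String × List String)) (k : String) : List String :=
  (PySem.Dict.mk cols).getD k []

-- the fixed category mapping (same literal in A and B)
def pvCategorias : List (String × String) :=
  [("temporais", "Temporal"), ("vendas", "Vendas"), ("precos", "Preço"),
   ("potencial", "Potencial"), ("overselling", "Overselling"), ("qualidade", "Qualidade")]

-- ===== PORT A =====
-- A's for-loop with early return
def pvLoopA (coluna : String) (cols : List (String × List String)) :
    List (String × String) → Option String
  | [] => none
  | (catKey, catLabel) :: rest =>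
      if (pvGetCols cols catKey).contains coluna then some catLabel
      else pvLoopA coluna cols rest

def identificar_categoria_feature_py (coluna : String) (cols : List (String × List String)) : String :=
  match pvLoopA coluna cols pvCategorias with
  | some lbl => lbl
  | none =>
      if (pvGetCols cols "numericas_originais").contains coluna then "Original" else "Outra"

-- ===== PORT B =====
-- the inner loop: index.setdefault(name, label) for each name
def pvAddPiece (idx : PySem.Dict String String) (names : List String) (label : String) :
    PySem.Dict String String :=
  names.foldl (fun i n => i.setdefault n label) idx

def identificar_categoria_feature_py_alt (coluna : String) (cols : List (String × List String)) : String :=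
  let idx := pvCategorias.foldl
    (fun i p => pvAddPiece i (pvGetCols cols p.1) p.2) PySem.Dict.empty
  let idx := pvAddPiece idx (pvGetCols cols "numericas_originais") "Original"
  idx.getD coluna "Outra"

-- ===== PRECONDITION & SPEC =====
def Spec_identificar_categoria_feature_py (coluna : String) (cols : List (String × List String)) (out : String) : Prop := out = identificar_categoria_feature_py_alt coluna cols
instance (coluna : String) (cols : List (String × List String)) (out : String) : Decidable (Spec_identificar_categoria_feature_py coluna cols out) := by unfold Spec_identificar_categoria_feature_py; infer_instance

-- ===== CLAIM (what is proved, stated in full; the proofs are below) =====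
def Claim_equal_identificar_categoria_feature_py : Prop := ∀ (coluna : String) (cols : List (String × List String)), Dom_identificar_categoria_feature_py coluna cols → Spec_identificar_categoria_feature_py coluna cols (identificar_categoria_feature_py coluna cols)

-- ===== LEMMAS AND PROOFS =====

-- one setdefault-loop over a name list: first write wins, so a prior entry survives
lemma pvAddPiece_get? (c label : String) (names : List String) (idx : PySem.Dict String String) :
    (pvAddPiece idx names label).get? c
      = (idx.get? c).or (if names.contains c then some label else none) := by
  induction names generalizing idx with
  | nil => simp [pvAddPiece]
  | cons n rest ih =>
      rw [pvAddPiece, List.foldl_cons, ← pvAddPiece, ih]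
      by_cases hc : idx.contains n
      · rw [PySem.Dict.setdefault_of_contains _ _ hc]
        by_cases hnc : n = c
        · subst hnc
          have : (idx.get? n).isSome := by
            rw [← PySem.Dict.contains_eq_isSome_get?, hc]
          obtain ⟨v, hv⟩ := Option.isSome_iff_exists.mp this
          simp [hv]
        · have hcn : ¬ c = n := fun h => hnc h.symm
          simp [hcn]
      · rw [PySem.Dict.setdefault_of_not_contains _ _ (by simpa using hc)]
        rw [PySem.Dict.get?_insert]
        by_cases hnc : c = n
        · subst hnc
          have h1 : (idx.get? c).isSome = false := by
            rw [← PySem.Dict.contains_eq_isSome_get?]; simpa using hc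
          have hnone : idx.get? c = none := by
            cases hg : idx.get? c with
            | none => rfl
            | some v => rw [hg] at h1; simp at h1
          simp [hnone]
        · have hcn : ¬ n = c := fun h => hnc h.symm
          simp [hnc]

-- the outer loop over the category mapping computes A's first-match search
lemma pvFold_get? (coluna : String) (cols : List (String × List String))
    (cats : List (String × String)) (idx : PySem.Dict String String) :
    (cats.foldl (fun i p => pvAddPiece i (pvGetCols cols p.1) p.2) idx).get? coluna
      = (idx.get? coluna).or (pvLoopA coluna cols cats) := by
  induction cats generalizing idx with
  | nil => simp [pvLoopA]
  | cons p rest ih =>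
      obtain ⟨k, lbl⟩ := p
      rw [List.foldl_cons, ih, pvAddPiece_get?, Option.or_assoc, pvLoopA]
      by_cases h : coluna ∈ pvGetCols cols k
      · simp [h]
      · simp [h]

-- ===== VERDICT (by name: the statement is the Claim_ definition above) =====
theorem identificar_categoria_feature_py_spec : Claim_equal_identificar_categoria_feature_py := by
  intro coluna cols _
  show _ = identificar_categoria_feature_py_alt coluna cols
  rw [identificar_categoria_feature_py_alt]
  rw [PySem.Dict.getD_eq_get?_getD, pvAddPiece_get?, pvFold_get?, PySem.Dict.get?_empty,
    Option.none_or]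
  rw [identificar_categoria_feature_py]
  cases h : pvLoopA coluna cols pvCategorias with
  | some lbl => simp
  | none =>
      by_cases ho : coluna ∈ pvGetCols cols "numericas_originais"
      · simp [ho]
      · simp [ho]
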